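-- pv_equiv track=rewrite | github.com/LAIYEN-TING/2026-python | weeks/week-07/solutions/1114405035/uva10093.py | build_valid_masks
-- ===== SOURCE A (Python) =====
-- from typing import Dict, List, Tuple
--
-- def build_valid_masks(columns: int, mountain_mask: int) -> List[int]:
--     valid = []
--     max_mask = 1 << columns
--     for mask in range(max_mask):
--         if mask & mountain_mask:
--             continue
--         if mask & (mask << 1):
--             continue
--         if mask & (mask << 2):
--             continue
--         valid.append(mask)
--     return valid
-- ===== SOURCE B (Python) =====
-- from typing import Dict, List, Tuple
--
-- def build_valid_masks(columns: int, mountain_mask: int) -> List[int]: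
--     # Dynamic programming: g[n] = valid masks over the low n columns, in increasing
--     # order; a mask either omits column n-1 (g[n-1]) or places its top bit there,
--     # which forces the rest to live in the lowest n-3 columns (g[max(n-3,0)]).
--     g = [[0]]
--     for n in range(1, columns + 1):
--         top = 1 << (n - 1)
--         cur = list(g[n - 1])
--         if not (mountain_mask & top):
--             cur.extend(top | m for m in g[max(n - 3, 0)])
--         g.append(cur)
--     return g[-1]
-- ===== Notes on version B (the rewrite author's own statement) =====
-- stated objective: alternative
-- what changed: Replaces the brute-force scan of all 2^columns masks with a dynamic-programming recurrence that builds only the valid masks (a mask either skips the top column, or places its top bit there over a mask of the lowest n-3 columns), emitting them directly in increasing order; intended to avoid the 2^columns scan, but a timing run could not confirm a speed-up (the output list itself grows exponentially).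
import Mathlib
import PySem

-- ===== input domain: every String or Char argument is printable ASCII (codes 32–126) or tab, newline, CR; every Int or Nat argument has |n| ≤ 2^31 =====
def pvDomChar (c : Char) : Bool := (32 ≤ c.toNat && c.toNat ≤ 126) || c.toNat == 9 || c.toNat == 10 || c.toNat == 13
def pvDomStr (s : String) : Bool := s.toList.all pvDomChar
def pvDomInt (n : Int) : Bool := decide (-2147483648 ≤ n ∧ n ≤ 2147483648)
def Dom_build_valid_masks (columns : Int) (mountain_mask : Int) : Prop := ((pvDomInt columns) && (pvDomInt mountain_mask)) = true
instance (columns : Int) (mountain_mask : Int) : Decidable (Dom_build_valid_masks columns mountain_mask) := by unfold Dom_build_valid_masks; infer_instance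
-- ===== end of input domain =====

-- B replaces A's brute-force scan of all 2^columns masks by a DP recurrence that
-- builds only the valid masks, emitting them directly in increasing order (alternative algorithm).

-- ===== PORT A =====
def build_valid_masks (columns : Int) (mountain_mask : Int) : List Int :=
  -- max_mask = 1 << columns; exact for columns ≥ 0 (Pre_); Python raises on a negative shift count
  let max_mask : Int := (1 : Int) <<< columns.toNat
  (PySem.List.pyRange 0 max_mask 1).foldl
    (fun valid mask =>
      if PySem.Int.band mask mountain_mask ≠ 0 then valid
      else if PySem.Int.band mask (mask <<< (1 : Nat)) ≠ 0 then valid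
      else if PySem.Int.band mask (mask <<< (2 : Nat)) ≠ 0 then valid
      else valid ++ [mask]) []

-- ===== PORT B =====
-- loop body of Source B's 'for n in range(1, columns + 1)'
def stepB (mountain_mask : Int) (g : List (List Int)) (n : Int) : List (List Int) :=
  let top : Int := (1 : Int) <<< (n - 1).toNat   -- n ≥ 1 for every n the loop feeds in, so toNat is exact
  let cur : List Int := PySem.List.pyGetD g (n - 1) []
  let cur : List Int :=
    if PySem.Int.band mountain_mask top = 0 then
      cur ++ (PySem.List.pyGetD g (max (n - 3) 0) []).map (fun m => PySem.Int.bor top m)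
    else cur
  g ++ [cur]

def build_valid_masks_alt (columns : Int) (mountain_mask : Int) : List Int :=
  let g : List (List Int) := (PySem.List.pyRange 1 (columns + 1) 1).foldl (stepB mountain_mask) [[0]]
  PySem.List.pyGetD g (-1) []

-- ===== PRECONDITION & SPEC =====
-- Pre_ excludes exactly columns < 0, where Python A raises ValueError ('negative shift count').
def Pre_build_valid_masks (columns : Int) (mountain_mask : Int) : Prop := 0 ≤ columns
instance (columns : Int) (mountain_mask : Int) : Decidable (Pre_build_valid_masks columns mountain_mask) := by unfold Pre_build_valid_masks; infer_instance
def pvWitness_build_valid_masks : Int × Int := (5, 9)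

def Spec_build_valid_masks (columns : Int) (mountain_mask : Int) (out : List Int) : Prop := out = build_valid_masks_alt columns mountain_mask
instance (columns : Int) (mountain_mask : Int) (out : List Int) : Decidable (Spec_build_valid_masks columns mountain_mask out) := by unfold Spec_build_valid_masks; infer_instance

-- ===== CLAIM (what is proved, stated in full; the proofs are below) =====
def Claim_equal_build_valid_masks : Prop := ∀ (columns : Int) (mountain_mask : Int), Dom_build_valid_masks columns mountain_mask → Pre_build_valid_masks columns mountain_mask → Spec_build_valid_masks columns mountain_mask (build_valid_masks columns mountain_mask)

-- ===== LEMMAS AND PROOFS =====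

-- bit k of mountain_mask, Python-exact also for negative values (infinite two's complement)
def mbit (mm : Int) (k : Nat) : Bool := if 0 ≤ mm then mm.toNat.testBit k else !((-mm - 1).toNat.testBit k)

-- A's acceptance condition, over the Nat value of the mask
def okMask (mm : Int) (M : Nat) : Bool :=
  (PySem.Int.band (M : Int) mm == 0) && ((M &&& (M <<< 1)) == 0) && ((M &&& (M <<< 2)) == 0)

def FV (mm : Int) (n : Nat) : List Nat := (List.range (2 ^ n)).filter (okMask mm)

def castL (l : List Nat) : List Int := l.map (fun M : Nat => (M : Int))

theorem land_eq_zero_iff (a b : Nat) : a &&& b = 0 ↔ ∀ k, a.testBit k = true → b.testBit k = false := by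
  constructor
  · intro h k ha
    have h2 : (a &&& b).testBit k = false := by rw [h]; exact Nat.zero_testBit k
    rw [Nat.testBit_land, ha] at h2; simpa using h2
  · intro h
    apply Nat.eq_of_testBit_eq
    intro i
    rw [Nat.testBit_land, Nat.zero_testBit]
    cases ha : a.testBit i with
    | false => simp
    | true => simp [h i ha]

theorem land_eq_self_iff (a b : Nat) : a &&& b = a ↔ ∀ k, a.testBit k = true → b.testBit k = true := by
  constructor
  · intro h k ha
    have h2 : (a &&& b).testBit k = a.testBit k := by rw [h]
    rw [Nat.testBit_land, ha] at h2; simpa using h2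
  · intro h
    apply Nat.eq_of_testBit_eq
    intro i
    rw [Nat.testBit_land]
    cases ha : a.testBit i with
    | false => simp
    | true => simp [h i ha]

theorem testBit_false_of_lt_of_le {r N j : Nat} (hr : r < 2 ^ N) (hj : N ≤ j) : r.testBit j = false :=
  Nat.testBit_eq_false_of_lt (lt_of_lt_of_le hr (Nat.pow_le_pow_right (by norm_num) hj))

theorem lt_two_pow_of_high_bits {r k : Nat} (h : ∀ i, k ≤ i → r.testBit i = false) : r < 2 ^ k := by
  have heq : r = r % 2 ^ k := by
    apply Nat.eq_of_testBit_eq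
    intro i
    rw [Nat.testBit_mod_two_pow]
    by_cases hi : i < k
    · simp [hi]
    · simp [hi, h i (by omega : k ≤ i)]
  have hpos : 0 < 2 ^ k := Nat.pow_pos (by norm_num : 0 < 2)
  rw [heq]
  exact Nat.mod_lt r hpos

theorem two_pow_add_eq_lor {N r : Nat} (hr : r < 2 ^ N) : 2 ^ N + r = 2 ^ N ||| r := by
  have h := Nat.shiftLeft_add_eq_or_of_lt (i := N) (b := r) (by simpa using hr) 1
  simpa [Nat.shiftLeft_eq] using h

theorem testBit_two_pow_add {N r : Nat} (hr : r < 2 ^ N) (k : Nat) :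
    (2 ^ N + r).testBit k = (decide (N = k) || r.testBit k) := by
  rw [two_pow_add_eq_lor hr, Nat.testBit_lor, Nat.testBit_two_pow]

theorem band_natCast_eq_zero_iff (mm : Int) (M : Nat) :
    PySem.Int.band (M : Int) mm = 0 ↔ ∀ k, M.testBit k = true → mbit mm k = false := by
  by_cases hmm : 0 ≤ mm
  · rw [PySem.Int.band_of_nonneg (by positivity) hmm]
    simp only [Int.toNat_natCast, Nat.cast_eq_zero, mbit, if_pos hmm]
    rw [land_eq_zero_iff]
  · have h1 : (0:Int) ≤ (M : Int) := by positivity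
    simp only [PySem.Int.band, if_pos h1, if_neg hmm, Int.toNat_natCast, Nat.cast_eq_zero]
    have hle : M &&& (-mm - 1).toNat ≤ M := Nat.and_le_left
    constructor
    · intro h k hk
      have hself : M &&& (-mm - 1).toNat = M := by omega
      have hb := (land_eq_self_iff M (-mm - 1).toNat).mp hself k hk
      simp only [mbit, if_neg hmm, Bool.not_eq_false']
      exact hb
    · intro h
      have hself : M &&& (-mm - 1).toNat = M := by
        rw [land_eq_self_iff]
        intro k hk
        have hb := h k hk
        simp only [mbit, if_neg hmm, Bool.not_eq_false'] at hb
        exact hb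
      omega

theorem band_two_pow_eq_zero_iff (mm : Int) (N : Nat) :
    PySem.Int.band mm (((2 ^ N : Nat) : Int)) = 0 ↔ mbit mm N = false := by
  rw [PySem.Int.band_comm, band_natCast_eq_zero_iff]
  constructor
  · intro h
    exact h N (by simp [Nat.testBit_two_pow])
  · intro h k hk
    rw [Nat.testBit_two_pow] at hk
    have hNk : N = k := by simpa using hk
    subst hNk; exact h

def noPair (s M : Nat) : Prop := ∀ k, M.testBit (k + s) = true → M.testBit k = false

theorem shift_eq_zero_iff (s M : Nat) : (M &&& (M <<< s) = 0) ↔ noPair s M := by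
  rw [land_eq_zero_iff]
  constructor
  · intro h k hk
    by_contra hc
    have hk' : M.testBit k = true := by
      cases hb : M.testBit k with
      | false => exact absurd hb hc
      | true => rfl
    have h2 := h (k + s) hk
    rw [Nat.testBit_shiftLeft] at h2
    simp at h2
    rw [h2] at hk'
    exact Bool.noConfusion hk'
  · intro h k hk
    rw [Nat.testBit_shiftLeft]
    by_cases hs : s ≤ k
    · have hf : M.testBit (k - s) = false := by
        apply h
        rw [Nat.sub_add_cancel hs]
        exact hk
      simp [hf]
    · simp [hs]

theorem noPair_two_pow_add {s N r : Nat} (hs : 1 ≤ s) (hr : r < 2 ^ N) :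
    noPair s (2 ^ N + r) ↔ noPair s r ∧ (s ≤ N → r.testBit (N - s) = false) := by
  constructor
  · intro h
    constructor
    · intro k hk
      have h1 := h k (by rw [testBit_two_pow_add hr]; simp [hk])
      rw [testBit_two_pow_add hr] at h1
      simp at h1
      exact h1.2
    · intro hsN
      have h1 := h (N - s) (by rw [testBit_two_pow_add hr]; simp; left; omega)
      rw [testBit_two_pow_add hr] at h1
      simp at h1
      exact h1.2
  · rintro ⟨h1, h2⟩ k hk
    rw [testBit_two_pow_add hr] at hk ⊢
    simp at hk
    rcases hk with hk | hk
    · have hsN : s ≤ N := by omega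
      have hkN : k = N - s := by omega
      subst hkN
      simp [h2 hsN]
      omega
    · have hlt : k + s < N := by
        by_contra hge
        have hb := testBit_false_of_lt_of_le hr (j := k + s) (by omega)
        rw [hb] at hk
        exact Bool.noConfusion hk
      simp [h1 k hk]
      omega

theorem lt_sub_two_iff {N r : Nat} (hr : r < 2 ^ N) :
    ((1 ≤ N → r.testBit (N - 1) = false) ∧ (2 ≤ N → r.testBit (N - 2) = false)) ↔ r < 2 ^ (N - 2) := by
  constructor
  · rintro ⟨h1, h2⟩
    apply lt_two_pow_of_high_bits
    intro i hi
    rcases (by omega : N ≤ i ∨ (1 ≤ N ∧ i = N - 1) ∨ (2 ≤ N ∧ i = N - 2)) with h | ⟨hN, rfl⟩ | ⟨hN, rfl⟩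
    · exact testBit_false_of_lt_of_le hr h
    · exact h1 hN
    · exact h2 hN
  · intro h
    exact ⟨fun _ => testBit_false_of_lt_of_le h (by omega), fun _ => testBit_false_of_lt_of_le h (by omega)⟩

theorem forall_bits_add {N r : Nat} (hr : r < 2 ^ N) (p : Nat → Prop) :
    (∀ k, (2 ^ N + r).testBit k = true → p k) ↔ p N ∧ (∀ k, r.testBit k = true → p k) := by
  constructor
  · intro h
    refine ⟨h N ?_, fun k hk => h k ?_⟩
    · rw [testBit_two_pow_add hr]; simp
    · rw [testBit_two_pow_add hr]; simp [hk]
  · rintro ⟨hN, h⟩ k hk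
    rw [testBit_two_pow_add hr] at hk
    simp at hk
    rcases hk with hk | hk
    · subst hk; exact hN
    · exact h k hk

theorem okMask_two_pow_add (mm : Int) {N r : Nat} (hr : r < 2 ^ N) :
    okMask mm (2 ^ N + r) = (!(mbit mm N) && (decide (r < 2 ^ (N - 2)) && okMask mm r)) := by
  rw [Bool.eq_iff_iff]
  simp only [okMask, Bool.and_eq_true, beq_iff_eq, Bool.not_eq_true', decide_eq_true_eq]
  rw [band_natCast_eq_zero_iff, band_natCast_eq_zero_iff,
      shift_eq_zero_iff, shift_eq_zero_iff, shift_eq_zero_iff, shift_eq_zero_iff,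
      forall_bits_add hr, noPair_two_pow_add (by norm_num) hr, noPair_two_pow_add (by norm_num) hr]
  have hf := lt_sub_two_iff hr
  tauto

theorem filter_range_restrict (p : Nat → Bool) {A B : Nat} (h : B ≤ A) :
    (List.range A).filter (fun r => decide (r < B) && p r) = (List.range B).filter p := by
  rw [show A = B + (A - B) by omega, List.range_add, List.filter_append]
  have h1 : (List.range B).filter (fun r => decide (r < B) && p r) = (List.range B).filter p := by
    apply List.filter_congr
    intro x hx
    simp [List.mem_range.mp hx]
  have h2 : (List.filter (fun r => decide (r < B) && p r) (List.map (fun x => B + x) (List.range (A - B)))) = [] := by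
    rw [List.filter_map]
    have h3 : List.filter ((fun r => decide (r < B) && p r) ∘ (fun x => B + x)) (List.range (A - B)) = [] := by
      apply List.filter_eq_nil_iff.mpr
      intro x _
      simp [Function.comp]
    rw [h3, List.map_nil]
  rw [h1, h2, List.append_nil]

theorem FV_succ (mm : Int) (N : Nat) :
    FV mm (N + 1) = FV mm N ++ (if mbit mm N then [] else (FV mm (N - 2)).map (fun M => 2 ^ N ||| M)) := by
  unfold FV
  rw [pow_succ, Nat.mul_two, List.range_add, List.filter_append]
  congr 1
  rw [List.filter_map]
  have hcg : List.filter (okMask mm ∘ (fun x => 2 ^ N + x)) (List.range (2 ^ N)) =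
      List.filter (fun r => !(mbit mm N) && (decide (r < 2 ^ (N - 2)) && okMask mm r)) (List.range (2 ^ N)) := by
    apply List.filter_congr
    intro r hrm
    exact okMask_two_pow_add mm (List.mem_range.mp hrm)
  rw [hcg]
  cases hmb : mbit mm N with
  | true =>
    simp
  | false =>
    simp only [Bool.not_false, Bool.true_and, if_neg (Bool.false_ne_true)]
    rw [filter_range_restrict (okMask mm) (Nat.pow_le_pow_right (by norm_num) (by omega))]
    apply List.map_congr_left
    intro r hrm
    have hr2 : r < 2 ^ (N - 2) := List.mem_range.mp (List.mem_of_mem_filter hrm)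
    have hrN : r < 2 ^ N := lt_of_lt_of_le hr2 (Nat.pow_le_pow_right (by norm_num) (by omega))
    exact two_pow_add_eq_lor hrN

theorem natCast_shiftLeft (M k : Nat) : ((M : Int) <<< k) = ((M <<< k : Nat) : Int) := by
  simp [Int.shiftLeft_eq, Nat.shiftLeft_eq]

theorem one_shiftLeft_int (k : Nat) : ((1 : Int) <<< k) = ((2 ^ k : Nat) : Int) := by
  simp [Int.shiftLeft_eq]

theorem A_eq (c mm : Int) : build_valid_masks c mm = castL (FV mm c.toNat) := by
  simp only [build_valid_masks]
  rw [one_shiftLeft_int, PySem.List.pyRange_zero_nat]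
  have hfun : (fun (valid : List Int) (mask : Int) =>
      if PySem.Int.band mask mm ≠ 0 then valid
      else if PySem.Int.band mask (mask <<< (1 : Nat)) ≠ 0 then valid
      else if PySem.Int.band mask (mask <<< (2 : Nat)) ≠ 0 then valid
      else valid ++ [mask]) =
      (fun acc x => if ((PySem.Int.band x mm == 0) && (PySem.Int.band x (x <<< (1 : Nat)) == 0) && (PySem.Int.band x (x <<< (2 : Nat)) == 0)) = true then acc ++ [id x] else acc) := by
    funext acc mask
    by_cases h0 : PySem.Int.band mask mm = 0 <;>
      by_cases h1 : PySem.Int.band mask (mask <<< (1 : Nat)) = 0 <;>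
        by_cases h2 : PySem.Int.band mask (mask <<< (2 : Nat)) = 0 <;>
          simp [h0, h1, h2]
  rw [hfun, PySem.List.foldl_append_if, List.nil_append, List.map_id, List.filter_map]
  have hcg : List.filter ((fun x => (PySem.Int.band x mm == 0) && (PySem.Int.band x (x <<< (1 : Nat)) == 0) && (PySem.Int.band x (x <<< (2 : Nat)) == 0)) ∘ (fun k : Nat => (k : Int))) (List.range (2 ^ c.toNat)) = List.filter (okMask mm) (List.range (2 ^ c.toNat)) := by
    apply List.filter_congr
    intro M _
    simp only [Function.comp, okMask]
    rw [natCast_shiftLeft M 1, natCast_shiftLeft M 2, PySem.Int.band_natCast, PySem.Int.band_natCast]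
    rw [Bool.eq_iff_iff]
    simp [Nat.cast_eq_zero]
  rw [hcg]
  rfl

theorem gstate (mm : Int) (N : Nat) :
    ((List.range N).map (fun k : Nat => (1 : Int) + k)).foldl (stepB mm) [[0]] =
      (List.range (N + 1)).map (fun i => castL (FV mm i)) := by
  induction N with
  | zero =>
    have hb0 : PySem.Int.band 0 mm = 0 := by
      rw [PySem.Int.band_comm]
      simpa using PySem.Int.band_zero mm
    have h0 : FV mm 0 = [0] := by
      unfold FV okMask
      simp [List.range_succ, hb0]
    simp [h0, castL]
  | succ n ih =>
    rw [List.range_succ, List.map_append, List.foldl_append, ih]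
    simp only [List.map_cons, List.map_nil, List.foldl_cons, List.foldl_nil]
    simp only [stepB]
    have htopn : ((1 : Int) + (n : Int) - 1).toNat = n := by omega
    have hidx : (1 + (n : Int) - 1) = ((n : Nat) : Int) := by push_cast; ring
    have hidx2 : max ((1 : Int) + (n : Int) - 3) 0 = (((n - 2 : Nat)) : Int) := by omega
    have hcur : PySem.List.pyGetD ((List.range (n + 1)).map (fun i => castL (FV mm i))) (1 + (n : Int) - 1) [] = castL (FV mm n) := by
      rw [hidx, PySem.List.pyGetD_natCast, List.getD_eq_getElem _ _ (by simp)]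
      simp
    have hcur2 : PySem.List.pyGetD ((List.range (n + 1)).map (fun i => castL (FV mm i))) (max ((1 : Int) + (n : Int) - 3) 0) [] = castL (FV mm (n - 2)) := by
      rw [hidx2, PySem.List.pyGetD_natCast, List.getD_eq_getElem _ _ (by simp)]
      simp
    rw [htopn, one_shiftLeft_int, hcur, hcur2]
    conv_rhs => rw [List.range_succ]
    rw [List.map_append]
    congr 1
    simp only [List.map_cons, List.map_nil]
    congr 1
    rw [FV_succ]
    simp only [castL, List.map_append]
    cases hmb : mbit mm n with
    | true =>
      rw [if_neg (by rw [band_two_pow_eq_zero_iff, hmb]; simp)]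
      simp
    | false =>
      rw [if_pos (by rw [band_two_pow_eq_zero_iff, hmb])]
      simp [List.map_map, Function.comp]
      intro a _
      rw [show ((2 : Int) ^ n) = (((2 ^ n : Nat)) : Int) by push_cast; ring, PySem.Int.bor_natCast]

theorem B_eq (c mm : Int) : build_valid_masks_alt c mm = castL (FV mm c.toNat) := by
  simp only [build_valid_masks_alt]
  rw [PySem.List.pyRange_one]
  have h1 : (c + 1 - 1).toNat = c.toNat := by omega
  rw [h1, gstate mm c.toNat]
  rw [PySem.List.pyGetD_neg_ofNat _ 1 _ (by omega) (by simp only [List.length_map, List.length_range]; omega)]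
  simp

-- ===== VERDICT (by name: the statement is the Claim_ definition above) =====
theorem build_valid_masks_spec : Claim_equal_build_valid_masks := by
  intro c mm _ _
  show build_valid_masks c mm = build_valid_masks_alt c mm
  rw [A_eq, B_eq]
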